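-- pv_equiv track=rewrite | github.com/DevinMonroe/openparliament | parliament/hansards/models.py | _topics
-- ===== SOURCE A (Python) =====
-- def _topics(l):
--     topics = []
--     last_topic = ''
--     for statement in l:
--         if statement[0] and statement[0] != last_topic:
--             last_topic = statement[0]
--             topics.append((statement[0], statement[1]))
--     return topics
-- ===== SOURCE B (Python) =====
-- def _topics(l):
--     # pre-filter empties, then group runs of consecutive equal topics, emitting the first statement of each run
--     filt = [s for s in l if s[0]]
--     out = []
--     i = 0
--     n = len(filt)
--     while i < n:
--         k = filt[i][0]
--         out.append((k, filt[i][1]))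
--         while i < n and filt[i][0] == k:
--             i += 1
--     return out
-- ===== Notes on version B (the rewrite author's own statement) =====
-- stated objective: alternative
-- what changed: Replaced the last_topic sentinel/stateful comparison loop by a pre-filter of empty topics followed by run-grouping (emit first element of each run of consecutive equal topics, then skip the run).
import Mathlib
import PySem

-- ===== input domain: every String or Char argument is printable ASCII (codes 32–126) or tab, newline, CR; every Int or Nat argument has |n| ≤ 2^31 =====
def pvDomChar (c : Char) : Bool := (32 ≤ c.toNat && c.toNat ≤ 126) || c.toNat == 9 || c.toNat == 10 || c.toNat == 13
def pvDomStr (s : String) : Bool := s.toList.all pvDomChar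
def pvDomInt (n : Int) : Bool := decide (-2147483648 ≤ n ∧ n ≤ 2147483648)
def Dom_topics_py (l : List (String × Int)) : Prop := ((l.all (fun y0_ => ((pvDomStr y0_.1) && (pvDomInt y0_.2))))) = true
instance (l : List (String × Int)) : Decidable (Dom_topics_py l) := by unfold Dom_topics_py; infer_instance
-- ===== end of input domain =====

-- B replaces A's last_topic sentinel loop by pre-filtering empty topics and grouping runs of
-- consecutive equal topics (alternative decomposition, same cost); return value only, no mutation.

-- ===== PORT A =====
-- loop over l carrying the (topics, last_topic) state, as in A
def topicsLoop : List (String × Int) → List (String × Int) → String → List (String × Int) × String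
  | [], topics, last => (topics, last)
  | s :: rest, topics, last =>
    if s.1 ≠ "" ∧ s.1 ≠ last then topicsLoop rest (topics ++ [(s.1, s.2)]) s.1
    else topicsLoop rest topics last

def topics_py (l : List (String × Int)) : List (String × Int) :=
  (topicsLoop l [] "").1

-- ===== PORT B =====
-- emit first statement of the run, then skip the run (Source B's inner while)
def altGroup : List (String × Int) → List (String × Int)
  | [] => []
  | s :: rest => (s.1, s.2) :: altGroup (rest.dropWhile (fun t => t.1 == s.1))
termination_by l => l.length
decreasing_by
  simp only [List.length_cons]
  exact Nat.lt_succ_of_le (List.length_dropWhile_le _ _)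

def topics_py_alt (l : List (String × Int)) : List (String × Int) :=
  altGroup (l.filter (fun s => !(s.1 == "")))

-- ===== PRECONDITION & SPEC =====
def Spec_topics_py (l : List (String × Int)) (out : List (String × Int)) : Prop := out = topics_py_alt l
instance (l : List (String × Int)) (out : List (String × Int)) : Decidable (Spec_topics_py l out) := by unfold Spec_topics_py; infer_instance

-- ===== CLAIM (what is proved, stated in full; the proofs are below) =====
def Claim_equal_topics_py : Prop := ∀ (l : List (String × Int)), Dom_topics_py l → Spec_topics_py l (topics_py l)

-- ===== LEMMAS AND PROOFS =====

-- A's loop result is the accumulator followed by B's grouping of the filtered tail,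
-- after dropping the leading run equal to last_topic.
theorem topicsLoop_eq (l : List (String × Int)) :
    ∀ (topics : List (String × Int)) (last : String),
    (topicsLoop l topics last).1 =
      topics ++ altGroup ((l.filter (fun s => !(s.1 == ""))).dropWhile (fun t => t.1 == last)) := by
  induction l with
  | nil => intro topics last; simp [topicsLoop, altGroup]
  | cons s rest ih =>
    intro topics last
    by_cases h1 : s.1 = ""
    · simp [topicsLoop, h1, ih]
    · have hf : ((s :: rest).filter (fun s => !(s.1 == ""))) =
          s :: rest.filter (fun s => !(s.1 == "")) := by
        simp [List.filter_cons, h1]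
      by_cases h2 : s.1 = last
      · simp only [topicsLoop]
        rw [if_neg (by tauto), ih, hf,
          List.dropWhile_cons_of_pos (by simp [h2])]
      · simp only [topicsLoop]
        rw [if_pos (⟨h1, h2⟩ : s.1 ≠ "" ∧ s.1 ≠ last), ih, hf,
          List.dropWhile_cons_of_neg (by simp [h2]), altGroup]
        simp

theorem dropWhile_empty_filter (l : List (String × Int)) :
    (l.filter (fun s => !(s.1 == ""))).dropWhile (fun t => t.1 == "") =
      l.filter (fun s => !(s.1 == "")) := by
  induction l with
  | nil => simp
  | cons s rest ih =>
    by_cases h : s.1 = "" <;>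
      simp [h, ih]

-- ===== VERDICT (by name: the statement is the Claim_ definition above) =====
theorem topics_py_spec : Claim_equal_topics_py := by
  intro l _
  unfold Spec_topics_py topics_py topics_py_alt
  rw [topicsLoop_eq, dropWhile_empty_filter]
  simp
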